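-- pv_equiv track=rewrite | github.com/sfewings/emon_Suite | python/exportCSV/export_csv.py | resolve_sensor_columns
-- ===== SOURCE A (Python) =====
-- def resolve_sensor_columns(device_type, subnode, fields, settings):
--     """Map parsed fields to human-readable CSV column names using settings.
--
--     Args:
--         device_type: e.g. "temp", "bat", "pulse"
--         subnode: integer subnode ID
--         fields: dict of {field_key: value} from parser
--         settings: full settings dict from EmonSettings
--
--     Returns:
--         dict of {column_name: value} for this line's data.
--         Skips sensors named "Unused".
--     """
--     node_settings = settings.get(device_type, {})
--     subnode_settings = node_settings.get(subnode, {})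
--     group_name = subnode_settings.get('name', f'{device_type}/{subnode}')
--     columns = {}
--
--     if device_type == 'temp':
--         for key, value in fields.items():
--             if key.startswith('t') and key[1:].isdigit():
--                 sensor_name = subnode_settings.get(key, f'{group_name} - {key}')
--                 if sensor_name != 'Unused':
--                     columns[f'{group_name} / {sensor_name}'] = value
--             elif key == 'supplyV':
--                 columns[f'{group_name} / supplyV'] = value
--
--     elif device_type == 'disp':
--         if group_name != 'Unused':
--             columns[f'{group_name} / temperature'] = fields.get('temperature')
--
--     elif device_type == 'pulse':
--         for key, value in fields.items():
--             if key.startswith('p') and key[1:].isdigit():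
--                 sensor_name = subnode_settings.get(key, f'{group_name} - {key}')
--                 if sensor_name != 'Unused':
--                     columns[f'{group_name} / {sensor_name} - power'] = value
--             elif key.startswith('pulse') and key[5:].isdigit():
--                 idx = key[5:]
--                 sensor_name = subnode_settings.get(f'p{idx}', f'{group_name} - p{idx}')
--                 if sensor_name != 'Unused':
--                     columns[f'{group_name} / {sensor_name} - pulse'] = value
--             elif key == 'supplyV':
--                 columns[f'{group_name} / supplyV'] = value
--
--     elif device_type == 'rain':
--         for key, value in fields.items():
--             columns[f'{group_name} / {key}'] = value
--
--     elif device_type == 'hws':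
--         for key, value in fields.items():
--             sensor_name = subnode_settings.get(key, f'{group_name} - {key}')
--             if sensor_name != 'Unused':
--                 columns[f'{group_name} / {sensor_name}'] = value
--
--     elif device_type == 'bat':
--         for key, value in fields.items():
--             if key.startswith('s') and key[1:].isdigit():
--                 sensor_name = subnode_settings.get(key, f'{group_name} - {key}')
--                 if sensor_name != 'Unused':
--                     columns[f'{group_name} / {sensor_name} - power'] = value
--             elif key.endswith('In') and key[0] == 's':
--                 base_key = key[:-2]  # e.g., "s0"
--                 sensor_name = subnode_settings.get(base_key, f'{group_name} - {base_key}')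
--                 if sensor_name != 'Unused':
--                     columns[f'{group_name} / {sensor_name} - pulseIn'] = value
--             elif key.endswith('Out') and key[0] == 's':
--                 base_key = key[:-3]  # e.g., "s0"
--                 sensor_name = subnode_settings.get(base_key, f'{group_name} - {base_key}')
--                 if sensor_name != 'Unused':
--                     columns[f'{group_name} / {sensor_name} - pulseOut'] = value
--             elif key.startswith('v') and key[1:].isdigit():
--                 sensor_name = subnode_settings.get(key, f'{group_name} - {key}')
--                 if sensor_name != 'Unused':
--                     columns[f'{group_name} / {sensor_name}'] = value
--
--     elif device_type == 'wtr':
--         for key, value in fields.items():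
--             if key.startswith('f') and key[1:].isdigit():
--                 sensor_name = subnode_settings.get(key, f'{group_name} - {key}')
--                 if sensor_name != 'Unused':
--                     columns[f'{group_name} / {sensor_name}'] = value
--             elif key.startswith('h') and key[1:].isdigit():
--                 sensor_name = subnode_settings.get(key, f'{group_name} - {key}')
--                 if sensor_name != 'Unused':
--                     columns[f'{group_name} / {sensor_name}'] = value
--             elif key == 'supplyV':
--                 columns[f'{group_name} / supplyV'] = value
--
--     elif device_type == 'scl':
--         columns[f'{group_name} / grams'] = fields.get('grams')
--         columns[f'{group_name} / supplyV'] = fields.get('supplyV')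
--
--     else:
--         # Generic handler for: inv, bee, air, leaf, gps, pth, bms, svc, mwv, imu
--         for key, value in fields.items():
--             columns[f'{group_name} / {key}'] = value
--
--     return columns
-- ===== SOURCE B (Python) =====
-- # Data-driven rewrite: per-device-type rule tables interpreted by one generic
-- # first-match engine; field columns are collected as a pair list first and the
-- # dict is built afterwards.
--
-- _RULES = {
--     'temp':  [('num', 't', None, ''), ('exact', 'supplyV')],
--     'pulse': [('num', 'p', None, ' - power'), ('num', 'pulse', 'p', ' - pulse'),
--               ('exact', 'supplyV')],
--     'rain':  [('all',)],
--     'hws':   [('allnamed',)],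
--     'bat':   [('num', 's', None, ' - power'), ('send', 'In', ' - pulseIn'),
--               ('send', 'Out', ' - pulseOut'), ('num', 'v', None, '')],
--     'wtr':   [('num', 'f', None, ''), ('num', 'h', None, ''), ('exact', 'supplyV')],
-- }
-- _GENERIC = [('all',)]
--
--
-- def _matches(rule, key):
--     kind = rule[0]
--     if kind == 'num':
--         return key.startswith(rule[1]) and key[len(rule[1]):].isdigit()
--     if kind == 'send':
--         return key.endswith(rule[1]) and key[0] == 's'
--     if kind == 'exact':
--         return key == rule[1]
--     return True  # 'all' / 'allnamed'
--
--
-- def _column(rule, key, subnode_settings, group_name):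
--     """Column name for a matched rule, or None when the sensor is Unused."""
--     kind = rule[0]
--     if kind == 'all' or kind == 'exact':
--         return f'{group_name} / {key}'
--     if kind == 'num':
--         skey = key if rule[2] is None else rule[2] + key[len(rule[1]):]
--         suffix = rule[3]
--     elif kind == 'send':
--         skey = key[:-len(rule[1])]
--         suffix = rule[2]
--     else:  # 'allnamed'
--         skey = key
--         suffix = ''
--     sensor_name = subnode_settings.get(skey, f'{group_name} - {skey}')
--     if sensor_name == 'Unused':
--         return None
--     return f'{group_name} / {sensor_name}{suffix}'
--
--
-- def resolve_sensor_columns(device_type, subnode, fields, settings):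
--     subnode_settings = settings.get(device_type, {}).get(subnode, {})
--     group_name = subnode_settings.get('name', f'{device_type}/{subnode}')
--     if device_type == 'disp':
--         if group_name == 'Unused':
--             return {}
--         return {f'{group_name} / temperature': fields.get('temperature')}
--     if device_type == 'scl':
--         return {f'{group_name} / grams': fields.get('grams'),
--                 f'{group_name} / supplyV': fields.get('supplyV')}
--     rules = _RULES.get(device_type, _GENERIC)
--     pairs = []
--     for key, value in fields.items():
--         rule = next((r for r in rules if _matches(r, key)), None)
--         if rule is not None:
--             col = _column(rule, key, subnode_settings, group_name)
--             if col is not None: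
--                 pairs.append((col, value))
--     return dict(pairs)
-- ===== Notes on version B (the rewrite author's own statement) =====
-- stated objective: alternative
-- what changed: A's seven hard-coded per-device-type field loops with inline if/elif cascades are replaced by a data-driven rule table: one generic first-match interpreter over per-device rule lists collects (column, value) pairs in a first pass and a dict is built from the pair list afterwards; disp/scl stay small fixed handlers.
import Mathlib
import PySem

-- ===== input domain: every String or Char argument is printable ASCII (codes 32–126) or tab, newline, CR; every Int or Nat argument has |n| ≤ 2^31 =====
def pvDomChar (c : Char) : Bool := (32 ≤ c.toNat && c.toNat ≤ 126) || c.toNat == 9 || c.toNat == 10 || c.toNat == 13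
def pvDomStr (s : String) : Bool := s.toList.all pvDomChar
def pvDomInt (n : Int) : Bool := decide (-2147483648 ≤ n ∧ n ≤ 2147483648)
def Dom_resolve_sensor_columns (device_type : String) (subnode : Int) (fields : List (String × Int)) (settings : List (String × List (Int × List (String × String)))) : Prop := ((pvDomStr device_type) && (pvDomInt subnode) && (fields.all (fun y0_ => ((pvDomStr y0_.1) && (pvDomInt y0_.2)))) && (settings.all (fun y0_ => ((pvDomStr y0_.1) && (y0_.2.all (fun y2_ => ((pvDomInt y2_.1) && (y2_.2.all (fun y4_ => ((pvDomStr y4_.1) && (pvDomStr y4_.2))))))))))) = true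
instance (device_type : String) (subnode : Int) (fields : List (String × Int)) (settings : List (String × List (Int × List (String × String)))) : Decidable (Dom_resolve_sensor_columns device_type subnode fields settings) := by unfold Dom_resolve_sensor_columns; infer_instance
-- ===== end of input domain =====

-- B replaces A's hard-coded per-device-type loops with a data-driven rule table read by one
-- generic first-match interpreter, collecting pairs first and building the dict after;
-- objective: alternative. A = B everywhere.

-- ===== PORT A =====
-- Literal transliteration of A. Python dicts are PySem.Dict over the given association
-- lists; `key.endswith('In') and key[0] == 's'` is ported as `&&` with PySem.Str.pyGet?:
-- exact, since Python's short-circuit only skips key[0] when the conjunction is already False.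
def resolve_sensor_columns (device_type : String) (subnode : Int) (fields : List (String × Int)) (settings : List (String × List (Int × List (String × String)))) : List (String × Option Int) :=
  let node_settings := (PySem.Dict.mk settings).getD device_type []
  let subnode_settings := PySem.Dict.mk ((PySem.Dict.mk node_settings).getD subnode [])
  let group_name := subnode_settings.getD "name" (device_type ++ "/" ++ PySem.Int.toStr subnode)
  let columns : PySem.Dict String (Option Int) := PySem.Dict.empty
  let columns :=
    if device_type = "temp" then
      fields.foldl (fun columns kv =>
        if PySem.Str.startswith kv.1 "t" && PySem.Str.strIsdigit (PySem.Str.slice kv.1 (some 1) none) then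
          let sensor_name := subnode_settings.getD kv.1 (group_name ++ " - " ++ kv.1)
          if sensor_name ≠ "Unused" then columns.insert (group_name ++ " / " ++ sensor_name) (some kv.2) else columns
        else if kv.1 = "supplyV" then columns.insert (group_name ++ " / supplyV") (some kv.2)
        else columns) columns
    else if device_type = "disp" then
      if group_name ≠ "Unused" then columns.insert (group_name ++ " / temperature") ((PySem.Dict.mk fields).get? "temperature") else columns
    else if device_type = "pulse" then
      fields.foldl (fun columns kv =>
        if PySem.Str.startswith kv.1 "p" && PySem.Str.strIsdigit (PySem.Str.slice kv.1 (some 1) none) then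
          let sensor_name := subnode_settings.getD kv.1 (group_name ++ " - " ++ kv.1)
          if sensor_name ≠ "Unused" then columns.insert (group_name ++ " / " ++ sensor_name ++ " - power") (some kv.2) else columns
        else if PySem.Str.startswith kv.1 "pulse" && PySem.Str.strIsdigit (PySem.Str.slice kv.1 (some 5) none) then
          let idx := PySem.Str.slice kv.1 (some 5) none
          let sensor_name := subnode_settings.getD ("p" ++ idx) (group_name ++ " - p" ++ idx)
          if sensor_name ≠ "Unused" then columns.insert (group_name ++ " / " ++ sensor_name ++ " - pulse") (some kv.2) else columns
        else if kv.1 = "supplyV" then columns.insert (group_name ++ " / supplyV") (some kv.2)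
        else columns) columns
    else if device_type = "rain" then
      fields.foldl (fun columns kv => columns.insert (group_name ++ " / " ++ kv.1) (some kv.2)) columns
    else if device_type = "hws" then
      fields.foldl (fun columns kv =>
        let sensor_name := subnode_settings.getD kv.1 (group_name ++ " - " ++ kv.1)
        if sensor_name ≠ "Unused" then columns.insert (group_name ++ " / " ++ sensor_name) (some kv.2) else columns) columns
    else if device_type = "bat" then
      fields.foldl (fun columns kv =>
        if PySem.Str.startswith kv.1 "s" && PySem.Str.strIsdigit (PySem.Str.slice kv.1 (some 1) none) then
          let sensor_name := subnode_settings.getD kv.1 (group_name ++ " - " ++ kv.1)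
          if sensor_name ≠ "Unused" then columns.insert (group_name ++ " / " ++ sensor_name ++ " - power") (some kv.2) else columns
        else if PySem.Str.endswith kv.1 "In" && (PySem.Str.pyGet? kv.1 0 == some 's') then
          let base_key := PySem.Str.slice kv.1 none (some (-2))
          let sensor_name := subnode_settings.getD base_key (group_name ++ " - " ++ base_key)
          if sensor_name ≠ "Unused" then columns.insert (group_name ++ " / " ++ sensor_name ++ " - pulseIn") (some kv.2) else columns
        else if PySem.Str.endswith kv.1 "Out" && (PySem.Str.pyGet? kv.1 0 == some 's') then
          let base_key := PySem.Str.slice kv.1 none (some (-3))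
          let sensor_name := subnode_settings.getD base_key (group_name ++ " - " ++ base_key)
          if sensor_name ≠ "Unused" then columns.insert (group_name ++ " / " ++ sensor_name ++ " - pulseOut") (some kv.2) else columns
        else if PySem.Str.startswith kv.1 "v" && PySem.Str.strIsdigit (PySem.Str.slice kv.1 (some 1) none) then
          let sensor_name := subnode_settings.getD kv.1 (group_name ++ " - " ++ kv.1)
          if sensor_name ≠ "Unused" then columns.insert (group_name ++ " / " ++ sensor_name) (some kv.2) else columns
        else columns) columns
    else if device_type = "wtr" then
      fields.foldl (fun columns kv =>
        if PySem.Str.startswith kv.1 "f" && PySem.Str.strIsdigit (PySem.Str.slice kv.1 (some 1) none) then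
          let sensor_name := subnode_settings.getD kv.1 (group_name ++ " - " ++ kv.1)
          if sensor_name ≠ "Unused" then columns.insert (group_name ++ " / " ++ sensor_name) (some kv.2) else columns
        else if PySem.Str.startswith kv.1 "h" && PySem.Str.strIsdigit (PySem.Str.slice kv.1 (some 1) none) then
          let sensor_name := subnode_settings.getD kv.1 (group_name ++ " - " ++ kv.1)
          if sensor_name ≠ "Unused" then columns.insert (group_name ++ " / " ++ sensor_name) (some kv.2) else columns
        else if kv.1 = "supplyV" then columns.insert (group_name ++ " / supplyV") (some kv.2)
        else columns) columns
    else if device_type = "scl" then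
      (columns.insert (group_name ++ " / grams") ((PySem.Dict.mk fields).get? "grams")).insert (group_name ++ " / supplyV") ((PySem.Dict.mk fields).get? "supplyV")
    else
      fields.foldl (fun columns kv => columns.insert (group_name ++ " / " ++ kv.1) (some kv.2)) columns
  columns.items

-- ===== PORT B =====
-- Transliteration of Source B: a rule datatype, the rule table, the generic matcher
-- `pvMatches` / resolver `pvColumn`, and one loop collecting pairs, then dict(pairs).
inductive PVRule
  | num (pre : String) (skeyPre : Option String) (suffix : String)
  | send (sfx : String) (suffix : String)
  | exact (key : String)
  | allPlain
  | allNamed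
deriving Repr, DecidableEq

def pvRules : List (String × List PVRule) := [
  ("temp",  [.num "t" none "", .exact "supplyV"]),
  ("pulse", [.num "p" none " - power", .num "pulse" (some "p") " - pulse", .exact "supplyV"]),
  ("rain",  [.allPlain]),
  ("hws",   [.allNamed]),
  ("bat",   [.num "s" none " - power", .send "In" " - pulseIn", .send "Out" " - pulseOut", .num "v" none ""]),
  ("wtr",   [.num "f" none "", .num "h" none "", .exact "supplyV"])]

def pvMatches (rule : PVRule) (key : String) : Bool :=
  match rule with
  | .num pre _ _ => PySem.Str.startswith key pre && PySem.Str.strIsdigit (PySem.Str.slice key (some (PySem.Str.len pre)) none)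
  | .send sfx _ => PySem.Str.endswith key sfx && (PySem.Str.pyGet? key 0 == some 's')
  | .exact k => key == k
  | .allPlain => true
  | .allNamed => true

def pvNamed (ss : PySem.Dict String String) (group skey suffix : String) : Option String :=
  let sensor_name := ss.getD skey (group ++ " - " ++ skey)
  if sensor_name = "Unused" then none else some (group ++ " / " ++ sensor_name ++ suffix)

def pvColumn (rule : PVRule) (key : String) (ss : PySem.Dict String String) (group : String) : Option String :=
  match rule with
  | .allPlain => some (group ++ " / " ++ key)
  | .exact _ => some (group ++ " / " ++ key)
  | .num pre skeyPre suffix =>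
      pvNamed ss group (match skeyPre with
        | none => key
        | some sp => sp ++ PySem.Str.slice key (some (PySem.Str.len pre)) none) suffix
  | .send sfx suffix => pvNamed ss group (PySem.Str.slice key none (some (-(PySem.Str.len sfx)))) suffix
  | .allNamed => pvNamed ss group key ""

def resolve_sensor_columns_alt (device_type : String) (subnode : Int) (fields : List (String × Int)) (settings : List (String × List (Int × List (String × String)))) : List (String × Option Int) :=
  let ss := PySem.Dict.mk ((PySem.Dict.mk ((PySem.Dict.mk settings).getD device_type [])).getD subnode [])
  let group := ss.getD "name" (device_type ++ "/" ++ PySem.Int.toStr subnode)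
  if device_type = "disp" then
    if group = "Unused" then []
    else (PySem.Dict.ofList [(group ++ " / temperature", (PySem.Dict.mk fields).get? "temperature")]).items
  else if device_type = "scl" then
    (PySem.Dict.ofList [(group ++ " / grams", (PySem.Dict.mk fields).get? "grams"),
                        (group ++ " / supplyV", (PySem.Dict.mk fields).get? "supplyV")]).items
  else
    let rules := (PySem.Dict.mk pvRules).getD device_type [PVRule.allPlain]
    let pairs := fields.foldl (fun acc kv =>
        match rules.find? (fun r => pvMatches r kv.1) with
        | none => acc
        | some rule =>
            match pvColumn rule kv.1 ss group with
            | none => acc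
            | some col => acc ++ [(col, some kv.2)]) []
    (PySem.Dict.ofList pairs).items

-- ===== PRECONDITION & SPEC =====
def Spec_resolve_sensor_columns (device_type : String) (subnode : Int) (fields : List (String × Int)) (settings : List (String × List (Int × List (String × String)))) (out : List (String × Option Int)) : Prop := out = resolve_sensor_columns_alt device_type subnode fields settings
instance (device_type : String) (subnode : Int) (fields : List (String × Int)) (settings : List (String × List (Int × List (String × String)))) (out : List (String × Option Int)) : Decidable (Spec_resolve_sensor_columns device_type subnode fields settings out) := by unfold Spec_resolve_sensor_columns; infer_instance

-- ===== CLAIM =====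
def Claim_equal_resolve_sensor_columns : Prop := ∀ (device_type : String) (subnode : Int) (fields : List (String × Int)) (settings : List (String × List (Int × List (String × String)))), Dom_resolve_sensor_columns device_type subnode fields settings → Spec_resolve_sensor_columns device_type subnode fields settings (resolve_sensor_columns device_type subnode fields settings)

-- ===== LEMMAS AND PROOFS =====

-- the pair(s) B's loop appends for one field
def pvGather (rules : List PVRule) (ss : PySem.Dict String String) (group : String) (kv : String × Int) : List (String × Option Int) :=
  match rules.find? (fun r => pvMatches r kv.1) with
  | none => []
  | some rule =>
      match pvColumn rule kv.1 ss group with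
      | none => []
      | some col => [(col, some kv.2)]

theorem pvGather_cons (r : PVRule) (rs : List PVRule) (ss : PySem.Dict String String) (group : String) (kv : String × Int) :
    pvGather (r :: rs) ss group kv =
      if pvMatches r kv.1 then
        (match pvColumn r kv.1 ss group with
          | none => []
          | some col => [(col, some kv.2)])
      else pvGather rs ss group kv := by
  unfold pvGather
  cases h : pvMatches r kv.1 <;> simp [h]

theorem pvGather_nil (ss : PySem.Dict String String) (group : String) (kv : String × Int) :
    pvGather [] ss group kv = [] := rfl

theorem pvCollect_eq_flatMap (rules : List PVRule) (ss : PySem.Dict String String) (group : String) (xs : List (String × Int)) (acc : List (String × Option Int)) :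
    xs.foldl (fun acc kv =>
        match rules.find? (fun r => pvMatches r kv.1) with
        | none => acc
        | some rule =>
            match pvColumn rule kv.1 ss group with
            | none => acc
            | some col => acc ++ [(col, some kv.2)]) acc
      = acc ++ xs.flatMap (pvGather rules ss group) := by
  have h : (fun (acc : List (String × Option Int)) (kv : String × Int) =>
      match rules.find? (fun r => pvMatches r kv.1) with
      | none => acc
      | some rule =>
          match pvColumn rule kv.1 ss group with
          | none => acc
          | some col => acc ++ [(col, some kv.2)])
      = fun acc kv => acc ++ pvGather rules ss group kv := by
    funext acc kv
    unfold pvGather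
    cases rules.find? (fun r => pvMatches r kv.1) with
    | none => simp
    | some rule => cases hc : pvColumn rule kv.1 ss group <;> simp [hc]
  rw [h, PySem.List.foldl_append_eq_flatMap]

-- B's staged build (collect pairs, then dict(pairs)) as a single fold over fields
theorem pvStaged (rules : List PVRule) (ss : PySem.Dict String String) (group : String) (xs : List (String × Int)) :
    PySem.Dict.ofList (xs.foldl (fun acc kv =>
        match rules.find? (fun r => pvMatches r kv.1) with
        | none => acc
        | some rule =>
            match pvColumn rule kv.1 ss group with
            | none => acc
            | some col => acc ++ [(col, some kv.2)]) [])
      = xs.foldl (fun c kv => (pvGather rules ss group kv).foldl (fun d p => d.insert p.1 p.2) c) PySem.Dict.empty := by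
  rw [pvCollect_eq_flatMap]
  show (xs.flatMap (pvGather rules ss group)).foldl (fun d p => d.insert p.1 p.2) PySem.Dict.empty = _
  rw [List.foldl_flatMap]

theorem pv_dash_p (idx : String) : (" - " ++ ("p" ++ idx) : String) = " - p" ++ idx := by
  rw [← String.append_assoc]; congr 1

-- ===== VERDICT =====
theorem resolve_sensor_columns_spec : Claim_equal_resolve_sensor_columns := by
  intro dt sub fields settings _
  unfold Spec_resolve_sensor_columns resolve_sensor_columns resolve_sensor_columns_alt
  by_cases h2 : dt = "disp"
  · subst h2
    simp only [String.reduceEq, reduceIte]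
    by_cases hg : (PySem.Dict.mk ((PySem.Dict.mk ((PySem.Dict.mk settings).getD "disp" [])).getD sub [])).getD "name" ("disp" ++ "/" ++ PySem.Int.toStr sub) = "Unused"
    · simp only [hg, ne_eq, not_true_eq_false, if_false, if_true]
      rfl
    · simp only [ne_eq, hg, not_false_eq_true, if_true, if_false]
      rfl
  by_cases h8 : dt = "scl"
  · subst h8
    simp only [String.reduceEq, reduceIte]
    rfl
  by_cases h1 : dt = "temp"
  · subst h1
    have hr : (PySem.Dict.mk pvRules).getD "temp" [PVRule.allPlain] = [PVRule.num "t" none "", PVRule.exact "supplyV"] := by decide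
    simp only [String.reduceEq, reduceIte, hr]
    rw [pvStaged]
    refine congrArg PySem.Dict.items ?_
    apply PySem.List.foldl_congr_mem
    intro cols kv _
    simp [pvGather_cons, pvGather_nil, pvMatches, pvColumn, pvNamed, PySem.Str.len, String.append_assoc]
    split_ifs <;> simp_all
  by_cases h3 : dt = "pulse"
  · subst h3
    have hr : (PySem.Dict.mk pvRules).getD "pulse" [PVRule.allPlain] = [PVRule.num "p" none " - power", PVRule.num "pulse" (some "p") " - pulse", PVRule.exact "supplyV"] := by decide
    simp only [String.reduceEq, reduceIte, hr]
    rw [pvStaged]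
    refine congrArg PySem.Dict.items ?_
    apply PySem.List.foldl_congr_mem
    intro cols kv _
    simp [pvGather_cons, pvGather_nil, pvMatches, pvColumn, pvNamed, PySem.Str.len, String.append_assoc]
    split_ifs <;> simp_all [pv_dash_p]
  by_cases h4 : dt = "rain"
  · subst h4
    have hr : (PySem.Dict.mk pvRules).getD "rain" [PVRule.allPlain] = [PVRule.allPlain] := by decide
    simp only [String.reduceEq, reduceIte, hr]
    rw [pvStaged]
    refine congrArg PySem.Dict.items ?_
    apply PySem.List.foldl_congr_mem
    intro cols kv _
    simp [pvGather_cons, pvMatches, pvColumn, String.append_assoc]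
  by_cases h5 : dt = "hws"
  · subst h5
    have hr : (PySem.Dict.mk pvRules).getD "hws" [PVRule.allPlain] = [PVRule.allNamed] := by decide
    simp only [String.reduceEq, reduceIte, hr]
    rw [pvStaged]
    refine congrArg PySem.Dict.items ?_
    apply PySem.List.foldl_congr_mem
    intro cols kv _
    simp [pvGather_cons, pvMatches, pvColumn, pvNamed, String.append_assoc]
    split_ifs <;> simp_all
  by_cases h6 : dt = "bat"
  · subst h6
    have hr : (PySem.Dict.mk pvRules).getD "bat" [PVRule.allPlain] = [PVRule.num "s" none " - power", PVRule.send "In" " - pulseIn", PVRule.send "Out" " - pulseOut", PVRule.num "v" none ""] := by decide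
    simp only [String.reduceEq, reduceIte, hr]
    rw [pvStaged]
    refine congrArg PySem.Dict.items ?_
    apply PySem.List.foldl_congr_mem
    intro cols kv _
    simp [pvGather_cons, pvGather_nil, pvMatches, pvColumn, pvNamed, PySem.Str.len, String.append_assoc]
    split_ifs <;> simp_all
  by_cases h7 : dt = "wtr"
  · subst h7
    have hr : (PySem.Dict.mk pvRules).getD "wtr" [PVRule.allPlain] = [PVRule.num "f" none "", PVRule.num "h" none "", PVRule.exact "supplyV"] := by decide
    simp only [String.reduceEq, reduceIte, hr]
    rw [pvStaged]
    refine congrArg PySem.Dict.items ?_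
    apply PySem.List.foldl_congr_mem
    intro cols kv _
    simp [pvGather_cons, pvGather_nil, pvMatches, pvColumn, pvNamed, PySem.Str.len, String.append_assoc]
    split_ifs <;> simp_all
  -- generic handler: every remaining device_type
  have hr : (PySem.Dict.mk pvRules).getD dt [PVRule.allPlain] = [PVRule.allPlain] := by
    simp [pvRules, PySem.Dict.getD_eq_get?_getD, PySem.Dict.get?,
          Ne.symm h1, Ne.symm h3,
          Ne.symm h4, Ne.symm h5, Ne.symm h6, Ne.symm h7]
  simp only [if_neg h1, if_neg h2, if_neg h3, if_neg h4, if_neg h5, if_neg h6, if_neg h7, if_neg h8, hr]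
  rw [pvStaged]
  refine congrArg PySem.Dict.items ?_
  apply PySem.List.foldl_congr_mem
  intro cols kv _
  simp [pvGather_cons, pvMatches, pvColumn, String.append_assoc]
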